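-- pv_equiv track=rewrite | github.com/Lambosaurus/Puzzlebox-FW | Fonts/convert.py | truncate_char
-- ===== SOURCE A (Python) =====
-- def truncate_char(col_data: list[list[int]]) -> list[list[int]]:
--     def is_col_empty(col: list[int]):
--         return all(b == 0 for b in col)
--
--     xstart = 0
--     xend = len(col_data) - 1
--     while xstart <= xend and is_col_empty(col_data[xstart]):
--         xstart += 1
--
--     while xend >= xstart and is_col_empty(col_data[xend]):
--         xend -= 1
--
--     return col_data[xstart:xend + 1]
-- ===== SOURCE B (Python) =====
-- def truncate_char(col_data: list[list[int]]) -> list[list[int]]: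
--     # One forward pass: indices of non-empty columns; slice between first and last.
--     idxs = [i for i, col in enumerate(col_data) if any(b != 0 for b in col)]
--     if not idxs:
--         return []
--     return col_data[idxs[0] : idxs[-1] + 1]
-- ===== Notes on version B (the rewrite author's own statement) =====
-- stated objective: simpler
-- what changed: Replaces the two inward-scanning while-loop pointers with a single forward pass that collects the indices of non-empty columns and slices between the first and last such index.
import Mathlib
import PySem

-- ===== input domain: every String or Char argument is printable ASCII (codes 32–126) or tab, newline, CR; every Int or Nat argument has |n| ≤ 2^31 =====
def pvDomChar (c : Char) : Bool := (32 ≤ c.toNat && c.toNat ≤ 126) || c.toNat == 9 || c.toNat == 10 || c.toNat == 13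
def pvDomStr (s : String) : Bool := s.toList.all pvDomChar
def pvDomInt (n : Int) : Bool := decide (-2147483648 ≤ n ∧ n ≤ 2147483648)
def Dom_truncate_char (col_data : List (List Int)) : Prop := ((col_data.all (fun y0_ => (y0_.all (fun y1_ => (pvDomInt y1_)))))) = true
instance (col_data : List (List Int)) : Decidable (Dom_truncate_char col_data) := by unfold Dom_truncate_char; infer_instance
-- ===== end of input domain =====

-- B replaces A's two inward-scanning pointer loops by one forward pass that collects the
-- indices of the non-empty columns and slices between the first and last one (same cost, simpler).

-- ===== PORT A =====

-- is_col_empty(col) = all(b == 0 for b in col)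
def pvIsColEmpty (col : List Int) : Bool := col.all (fun b => b == 0)

-- `while xstart <= xend and is_col_empty(col_data[xstart]): xstart += 1` (xend = len-1 is fixed here;
-- for 0 ≤ xstart, `xstart ≤ len-1` is `xstart < len`, and then col_data[xstart] is in range)
def pvScanStart (col_data : List (List Int)) (xstart : Nat) : Nat :=
  if h : xstart < col_data.length then
    if pvIsColEmpty (col_data[xstart]'h) then pvScanStart col_data (xstart + 1)
    else xstart
  else xstart
termination_by col_data.length - xstart

-- `while xend >= xstart and is_col_empty(col_data[xend]): xend -= 1` (inside the loop
-- 0 ≤ xstart ≤ xend < len, so `(pyGet? … ).getD []` is the in-range element)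
def pvScanEnd (col_data : List (List Int)) (xstart : Nat) (xend : Int) : Int :=
  if h : (xstart : Int) ≤ xend ∧ pvIsColEmpty ((PySem.List.pyGet? col_data xend).getD []) then
    pvScanEnd col_data xstart (xend - 1)
  else xend
termination_by (xend + 1 - xstart).toNat
decreasing_by omega

def truncate_char (col_data : List (List Int)) : List (List Int) :=
  let xstart := pvScanStart col_data 0
  let xend := pvScanEnd col_data xstart ((col_data.length : Int) - 1)
  PySem.List.slice col_data (some (xstart : Int)) (some (xend + 1))

-- ===== PORT B =====

-- idxs = [i for i, col in enumerate(col_data) if any(b != 0 for b in col)]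
def pvNonEmptyIdxs (col_data : List (List Int)) : List Int :=
  ((PySem.List.enumerate col_data 0).filter (fun p => p.2.any (fun b => b != 0))).map (fun p => p.1)

def truncate_char_alt (col_data : List (List Int)) : List (List Int) :=
  match h : pvNonEmptyIdxs col_data with
  | [] => []
  | i :: rest => PySem.List.slice col_data (some i) (some ((i :: rest).getLast (by simp) + 1))



-- ===== PRECONDITION & SPEC =====
def Spec_truncate_char (col_data : List (List Int)) (out : List (List Int)) : Prop := out = truncate_char_alt col_data
instance (col_data : List (List Int)) (out : List (List Int)) : Decidable (Spec_truncate_char col_data out) := by unfold Spec_truncate_char; infer_instance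

-- ===== CLAIM (what is proved, stated in full; the proofs are below) =====
def Claim_equal_truncate_char : Prop := ∀ (col_data : List (List Int)), Dom_truncate_char col_data → Spec_truncate_char col_data (truncate_char col_data)

-- ===== LEMMAS AND PROOFS =====

theorem takeWhile_append_of_not_all {α : Type} (p : α → Bool) (l l' : List α)
    (h : ¬ ∀ x ∈ l, p x = true) : (l ++ l').takeWhile p = l.takeWhile p := by
  induction l with
  | nil => simp at h
  | cons c t ih =>
    by_cases hc : p c
    · simp only [List.cons_append, List.takeWhile_cons_of_pos hc]
      rw [ih]; intro ht; exact h (by simpa [hc] using ht)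
    · simp [List.takeWhile_cons_of_neg, hc]

theorem pvScanStart_spec (cd : List (List Int)) (s : Nat) (hs : s ≤ cd.length) :
    pvScanStart cd s = s + ((cd.drop s).takeWhile pvIsColEmpty).length := by
  unfold pvScanStart
  split
  · rename_i h
    rw [List.drop_eq_getElem_cons h]
    split
    · rename_i he
      rw [pvScanStart_spec cd (s+1) (by omega), List.takeWhile_cons_of_pos he]
      simp; omega
    · rename_i he
      rw [List.takeWhile_cons_of_neg (by simpa using he)]
      simp
  · rename_i h
    rw [List.drop_eq_nil_of_le (by omega)]
    simp
termination_by cd.length - s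

theorem pvScanEnd_spec (cd : List (List Int)) (xs : Nat) (m : Nat) (h : xs + m ≤ cd.length) :
    pvScanEnd cd xs ((xs : Int) + m - 1)
      = (xs : Int) + m - 1 - ((((cd.drop xs).take m).reverse.takeWhile pvIsColEmpty).length) := by
  induction m with
  | zero =>
    unfold pvScanEnd
    rw [dif_neg (by push_cast; omega)]
    simp
  | succ k ih =>
    have hidx : xs + k < cd.length := by omega
    have hget : ((xs : Int) + ((k+1 : Nat) : Int) - 1) = ((xs + k : Nat) : Int) := by push_cast; omega
    have hdk : k < (cd.drop xs).length := by simp; omega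
    have htake : ((cd.drop xs).take (k+1)).reverse
        = cd[xs + k] :: ((cd.drop xs).take k).reverse := by
      rw [List.take_add_one]
      have : (cd.drop xs)[k]? = some cd[xs + k] := by
        rw [List.getElem?_drop]
        exact List.getElem?_eq_getElem (by omega)
      rw [this]
      simp
    unfold pvScanEnd
    rw [hget, PySem.List.pyGet?_natCast]
    rw [List.getElem?_eq_getElem hidx]
    simp only [Option.getD_some]
    by_cases he : pvIsColEmpty cd[xs + k]
    · rw [dif_pos ⟨by push_cast; omega, he⟩]
      have harg : ((xs + k : Nat) : Int) - 1 = (xs : Int) + (k : Nat) - 1 := by push_cast; omega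
      rw [harg, ih (by omega)]
      rw [htake, List.takeWhile_cons_of_pos he]
      simp
      omega
    · rw [dif_neg (by simp [he])]
      rw [htake, List.takeWhile_cons_of_neg (by simpa using he)]
      simp

-- proof-only helper: the filtered enumerate starting at offset s
def pvJ (cd : List (List Int)) (s : Int) : List Int :=
  ((PySem.List.enumerate cd s).filter (fun p => p.2.any (fun b => b != 0))).map (fun p => p.1)

theorem pvJ_cons (c : List Int) (t : List (List Int)) (s : Int) :
    pvJ (c :: t) s = if pvIsColEmpty c then pvJ t (s+1) else s :: pvJ t (s+1) := by
  have hp : (c.any fun b => b != 0) = !pvIsColEmpty c := by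
    rw [pvIsColEmpty, List.all_eq_not_any_not]; simp [bne]
  simp only [pvJ, PySem.List.enumerate_cons, List.filter_cons, hp]
  by_cases he : pvIsColEmpty c <;> simp [he]

theorem pvJ_nil_iff (cd : List (List Int)) (s : Int) :
    pvJ cd s = [] ↔ ∀ c ∈ cd, pvIsColEmpty c = true := by
  induction cd generalizing s with
  | nil => simp [pvJ]
  | cons c t ih =>
    rw [pvJ_cons]
    by_cases he : pvIsColEmpty c <;> simp [he, ih]

theorem pvJ_head (cd : List (List Int)) (s : Int) (i : Int) (rest : List Int)
    (h : pvJ cd s = i :: rest) : i = s + ((cd.takeWhile pvIsColEmpty).length) := by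
  induction cd generalizing s i rest with
  | nil => simp [pvJ] at h
  | cons c t ih =>
    rw [pvJ_cons] at h
    by_cases he : pvIsColEmpty c
    · rw [if_pos he] at h
      rw [List.takeWhile_cons_of_pos he]
      have := ih (s+1) i rest h
      simp [this]; ring
    · rw [if_neg he] at h
      rw [List.takeWhile_cons_of_neg (by simpa using he)]
      simp at h ⊢
      exact h.1.symm

theorem pvJ_getLast (cd : List (List Int)) (s : Int) (h : pvJ cd s ≠ []) :
    (pvJ cd s).getLast h
      = s + cd.length - 1 - ((cd.reverse.takeWhile pvIsColEmpty).length) := by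
  induction cd generalizing s with
  | nil => simp [pvJ] at h
  | cons c t ih =>
    by_cases hne : pvJ t (s+1) = []
    · -- tail all empty; head must be non-empty
      have hall : ∀ x ∈ t, pvIsColEmpty x = true := (pvJ_nil_iff t (s+1)).mp hne
      have hc : ¬ pvIsColEmpty c := by
        intro hc
        exact h (by rw [pvJ_cons, if_pos hc]; exact hne)
      have hrev : ((c :: t).reverse.takeWhile pvIsColEmpty).length = t.length := by
        have : (c :: t).reverse = t.reverse ++ [c] := by simp
        rw [this, List.takeWhile_append_of_pos (by simpa using hall),
            List.takeWhile_cons_of_neg (by simpa using hc)]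
        simp
      have hJ : pvJ (c :: t) s = [s] := by rw [pvJ_cons, if_neg hc, hne]
      rw [hrev]
      -- getLast of [s]
      have : (pvJ (c :: t) s).getLast h = s := by
        simp [List.getLast_congr _ _ hJ]
      rw [this]; simp; ring
    · have hnall : ¬ ∀ x ∈ t, pvIsColEmpty x = true := fun hall => hne ((pvJ_nil_iff t (s+1)).mpr hall)
      have hrev : ((c :: t).reverse.takeWhile pvIsColEmpty).length
          = ((t.reverse.takeWhile pvIsColEmpty)).length := by
        have h1 : (c :: t).reverse = t.reverse ++ [c] := by simp
        rw [h1, takeWhile_append_of_not_all _ _ _ (by simpa using hnall)]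
      have hlast : (pvJ (c :: t) s).getLast h = (pvJ t (s+1)).getLast hne := by
        by_cases hc : pvIsColEmpty c
        · have hJ : pvJ (c :: t) s = pvJ t (s+1) := by rw [pvJ_cons, if_pos hc]
          exact List.getLast_congr _ _ hJ
        · have hJ : pvJ (c :: t) s = s :: pvJ t (s+1) := by rw [pvJ_cons, if_neg hc]
          rw [List.getLast_congr _ (List.cons_ne_nil _ _) hJ, List.getLast_cons hne]
      rw [hlast, ih (s+1) hne, hrev]
      simp; ring

theorem pv_take_length_takeWhile (p : List Int → Bool) (l : List (List Int)) :
    l.take (l.takeWhile p).length = l.takeWhile p := by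
  induction l with
  | nil => simp
  | cons c t ih =>
    by_cases hc : p c
    · rw [List.takeWhile_cons_of_pos hc]; simpa using ih
    · rw [List.takeWhile_cons_of_neg (by simpa using hc)]; simp

theorem pv_length_takeWhile_le (p : List Int → Bool) (l : List (List Int)) :
    (l.takeWhile p).length ≤ l.length := by
  calc (l.takeWhile p).length ≤ (l.takeWhile p).length + (l.dropWhile p).length := by omega
  _ = l.length := by rw [← List.length_append, List.takeWhile_append_dropWhile]

theorem main_eq (cd : List (List Int)) : truncate_char cd = truncate_char_alt cd := by
  have hxs : pvScanStart cd 0 = (cd.takeWhile pvIsColEmpty).length := by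
    simpa using pvScanStart_spec cd 0 (by omega)
  have hxs_le : (cd.takeWhile pvIsColEmpty).length ≤ cd.length := pv_length_takeWhile_le _ _
  have hend := pvScanEnd_spec cd (pvScanStart cd 0) (cd.length - pvScanStart cd 0)
    (by omega)
  have hc : ((pvScanStart cd 0 : Nat) : Int) + ((cd.length - pvScanStart cd 0 : Nat) : Int) - 1
      = (cd.length : Int) - 1 := by
    rw [Nat.cast_sub (by omega)]; ring
  rw [hc] at hend
  have htk : (cd.drop (pvScanStart cd 0)).take (cd.length - pvScanStart cd 0)
      = cd.drop (pvScanStart cd 0) := by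
    apply List.take_of_length_le; simp
  rw [htk] at hend
  show PySem.List.slice cd (some ((pvScanStart cd 0 : Nat) : Int))
      (some (pvScanEnd cd (pvScanStart cd 0) ((cd.length : Int) - 1) + 1)) = truncate_char_alt cd
  rw [hend]
  unfold truncate_char_alt
  split
  · -- pvNonEmptyIdxs cd = []
    rename_i h
    have hall : ∀ c ∈ cd, pvIsColEmpty c = true := (pvJ_nil_iff cd 0).mp h
    have hxn : pvScanStart cd 0 = cd.length := by
      rw [hxs, List.takeWhile_eq_self_iff.mpr hall]
    have hK : ((cd.drop (pvScanStart cd 0)).reverse.takeWhile pvIsColEmpty).length = 0 := by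
      rw [hxn]; simp
    rw [hK, hxn]
    have : ((cd.length : Int) - 1 - (0:Nat) + 1) = (cd.length : Int) := by simp
    rw [this, PySem.List.slice_natCast]
    simp
  · -- pvNonEmptyIdxs cd = i :: rest
    rename_i i rest h
    have h' : pvJ cd 0 = i :: rest := h
    have hi : i = ((pvScanStart cd 0 : Nat) : Int) := by
      rw [pvJ_head cd 0 i rest h', hxs]; simp
    have hne : pvJ cd 0 ≠ [] := by rw [h']; exact List.cons_ne_nil _ _
    have hlast : (i :: rest).getLast (List.cons_ne_nil _ _)
        = (0 : Int) + cd.length - 1 - ((cd.reverse.takeWhile pvIsColEmpty).length) := by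
      rw [← List.getLast_congr _ _ h']
      exact pvJ_getLast cd 0 hne
    -- trailing-empty count of cd equals that of cd.drop xs
    have hsplit : cd.reverse = (cd.drop (pvScanStart cd 0)).reverse
        ++ (cd.take (pvScanStart cd 0)).reverse := by
      rw [← List.reverse_append]; simp
    have hnall : ¬ ∀ x ∈ (cd.drop (pvScanStart cd 0)).reverse, pvIsColEmpty x = true := by
      intro hall
      -- cd has a non-empty column; it lies in the dropped part
      have hex : ¬ ∀ c ∈ cd, pvIsColEmpty c = true := by
        intro hall'
        exact hne ((pvJ_nil_iff cd 0).mpr hall')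
      simp only [not_forall] at hex
      obtain ⟨c, hmem, hce⟩ := hex
      have : c ∈ cd.take (pvScanStart cd 0) ∨ c ∈ cd.drop (pvScanStart cd 0) := by
        rw [← List.mem_append, List.take_append_drop]; exact hmem
      rcases this with htk' | hdr
      · -- every element of the take part satisfies pvIsColEmpty
        rw [hxs, pv_take_length_takeWhile] at htk'
        exact hce (List.mem_takeWhile_imp htk')
      · exact hce (hall c (by simpa using hdr))
    have hKeq : (cd.reverse.takeWhile pvIsColEmpty).length
        = ((cd.drop (pvScanStart cd 0)).reverse.takeWhile pvIsColEmpty).length := by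
      rw [hsplit, takeWhile_append_of_not_all _ _ _ hnall]
    rw [hlast, hKeq, hi]
    norm_num

-- ===== VERDICT (by name: the statement is the Claim_ definition above) =====
theorem truncate_char_spec : Claim_equal_truncate_char := by
  intro cd _
  unfold Spec_truncate_char
  exact main_eq cd
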